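-- pv_equiv track=rewrite | github.com/adityaDave2011/InformationSecurity | Playfair.py | gen_digrams
-- ===== SOURCE A (Python) =====
-- from math import ceil
--
-- def gen_digrams(text):
--     digram_list = list()
--     no_of_digrams = ceil(len(text) / 2)
--     for i in range(no_of_digrams):
--         digram = text[2 * i:2 * i + 2]
--         if (len(digram) is 2) and (digram[0] is digram[1]):
--             text = text[0:2 * i + 1] + 'x' + text[2 * i + 1:len(text)]
--     for i in range(no_of_digrams):
--         digram = text[2 * i:2 * i + 2]
--         digram_list.append(digram)
--     return digram_list
-- ===== SOURCE B (Python) =====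
-- from math import ceil
--
-- def gen_digrams(text):
--     # Single linear pass: i walks the original text; a duplicate pair emits
--     # text[i] + 'x' and advances by one, anything else emits text[i:i+2] and
--     # advances by two; output is capped at ceil(len(text)/2) digrams like A.
--     out = []
--     i = 0
--     for _ in range(ceil(len(text) / 2)):
--         if i + 1 < len(text) and text[i] == text[i + 1]:
--             out.append(text[i:i + 1] + 'x')
--             i += 1
--         else:
--             out.append(text[i:i + 2])
--             i += 2
--     return out
-- ===== Notes on version B (the rewrite author's own statement) =====
-- stated objective: faster
-- what changed: A repeatedly slices and rebuilds the whole string inside a loop over digram positions and then re-slices every digram in a second loop; B makes one linear left-to-right pass over the characters, emitting each digram (padding a duplicate pair with 'x') as it goes, capped at ceil(len/2) digrams.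
import Mathlib
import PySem

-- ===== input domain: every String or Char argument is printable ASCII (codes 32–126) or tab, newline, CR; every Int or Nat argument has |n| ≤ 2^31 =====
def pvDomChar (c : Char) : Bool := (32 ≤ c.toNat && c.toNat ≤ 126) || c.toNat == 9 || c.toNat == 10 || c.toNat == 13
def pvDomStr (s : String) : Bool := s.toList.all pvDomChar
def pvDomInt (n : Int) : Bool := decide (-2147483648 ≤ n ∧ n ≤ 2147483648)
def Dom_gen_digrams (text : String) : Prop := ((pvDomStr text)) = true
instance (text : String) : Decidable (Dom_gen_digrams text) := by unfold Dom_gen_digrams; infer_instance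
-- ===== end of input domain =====

-- B replaces A's slice-and-rebuild double loop by a single linear pass over the characters,
-- padding duplicate pairs with 'x' on the fly and capping at ceil(len/2) digrams.


-- ===== PORT A =====
-- Body of A's first loop (text is the value threaded through the loop; Python slices).
-- Python compares `digram[0] is digram[1]` and `len(digram) is 2`: on the printable-ASCII
-- domain single-character strings and small ints are interned in CPython, so `is` = `==`.
def gen_digramsStep (t : List Char) (i : Int) : List Char :=
  let digram := PySem.List.slice t (some (2 * i)) (some (2 * i + 2))
  if digram.length = 2 ∧ PySem.List.pyGet? digram 0 = PySem.List.pyGet? digram 1 then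
    PySem.List.slice t (some 0) (some (2 * i + 1)) ++ ['x'] ++
      PySem.List.slice t (some (2 * i + 1)) (some (t.length : Int))
  else t

-- no_of_digrams = ceil(len(text) / 2); the float division is exact here, = (len + 1) / 2
def gen_digramsN (t : List Char) : Int := ((t.length + 1) / 2 : Nat)

def gen_digrams (text : String) : List String :=
  (PySem.List.pyRange 0 (gen_digramsN text.toList) 1).map
    (fun i => String.ofList (PySem.List.slice
      ((PySem.List.pyRange 0 (gen_digramsN text.toList) 1).foldl gen_digramsStep text.toList)
      (some (2 * i)) (some (2 * i + 2))))

-- ===== PORT B =====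
-- Source B's loop: one digram appended per iteration, i walks the (unchanged) input text.
def gen_digramsAltGo (t : List Char) : Nat → Nat → List String
  | 0, _ => []
  | k + 1, i =>
    if i + 1 < t.length ∧ PySem.List.pyGet? t (i : Int) = PySem.List.pyGet? t ((i : Int) + 1) then
      String.ofList (PySem.List.slice t (some (i : Int)) (some ((i : Int) + 1)) ++ ['x'])
        :: gen_digramsAltGo t k (i + 1)
    else
      String.ofList (PySem.List.slice t (some (i : Int)) (some ((i : Int) + 2)))
        :: gen_digramsAltGo t k (i + 2)

def gen_digrams_alt (text : String) : List String :=
  gen_digramsAltGo text.toList ((text.toList.length + 1) / 2) 0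

-- ===== PRECONDITION & SPEC =====
def Spec_gen_digrams (text : String) (out : List String) : Prop := out = gen_digrams_alt text
instance (text : String) (out : List String) : Decidable (Spec_gen_digrams text out) := by unfold Spec_gen_digrams; infer_instance

-- ===== CLAIM (what is proved, stated in full; the proofs are below) =====
def Claim_equal_gen_digrams : Prop := ∀ (text : String), Dom_gen_digrams text → Spec_gen_digrams text (gen_digrams text)

-- ===== LEMMAS AND PROOFS =====

-- Pure (drop/take) form of A's first-loop body, index as a Nat.
def stepP (t : List Char) (j : Nat) : List Char :=
  let d := (t.drop (2 * j)).take 2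
  if d.length = 2 ∧ d[0]? = d[1]? then
    t.take (2 * j + 1) ++ 'x' :: t.drop (2 * j + 1)
  else t

-- List-level form of B's pass (gen_digramsAltGo before the String.ofList).
def lin : Nat → List Char → List (List Char)
  | 0, _ => []
  | k + 1, a :: b :: rest =>
    if a = b then [a, 'x'] :: lin k (b :: rest) else [a, b] :: lin k rest
  | k + 1, [a] => [a] :: lin k []
  | k + 1, [] => [] :: lin k []

theorem slice1_eq (u : List Char) (i : Nat) :
    PySem.List.slice u (some (i : Int)) (some ((i : Int) + 1)) = (u.drop i).take 1 := by
  rw [show ((i : Int) + 1) = ((i + 1 : Nat) : Int) by push_cast; ring, PySem.List.slice_natCast]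
  congr 1
  omega

theorem sliceI2_eq (u : List Char) (i : Nat) :
    PySem.List.slice u (some (i : Int)) (some ((i : Int) + 2)) = (u.drop i).take 2 := by
  rw [show ((i : Int) + 2) = ((i + 2 : Nat) : Int) by push_cast; ring, PySem.List.slice_natCast]
  congr 1
  omega

theorem go_eq_lin (k : Nat) : ∀ (i : Nat) (t : List Char),
    gen_digramsAltGo t k i = (lin k (t.drop i)).map String.ofList := by
  induction k with
  | zero => intro i t; simp [gen_digramsAltGo, lin]
  | succ k ih =>
    intro i t
    unfold gen_digramsAltGo
    rw [slice1_eq, sliceI2_eq,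
        show ((i : Int) + 1) = ((i + 1 : Nat) : Int) by push_cast; ring,
        PySem.List.pyGet?_natCast, PySem.List.pyGet?_natCast]
    rcases hs : t.drop i with _ | ⟨a, s'⟩
    · have hge : t.length ≤ i := by
        have := congrArg List.length hs; simp at this; omega
      rw [if_neg (by omega : ¬ (i + 1 < t.length ∧ t[i]? = t[i + 1]?))]
      rw [ih (i + 2) t, List.drop_eq_nil_of_le (by omega : t.length ≤ i + 2)]
      simp [lin]
    · rcases hs' : s' with _ | ⟨b, rest⟩
      · subst hs'
        have hlen : t.length = i + 1 := by
          have := congrArg List.length hs; simp at this; omega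
        rw [if_neg (by omega : ¬ (i + 1 < t.length ∧ t[i]? = t[i + 1]?))]
        rw [ih (i + 2) t, List.drop_eq_nil_of_le (by omega : t.length ≤ i + 2)]
        simp [lin]
      · subst hs'
        have hlen : i + 2 ≤ t.length := by
          have := congrArg List.length hs; simp at this; omega
        have hga : t[i]? = some a := by
          have h0 : (t.drop i)[0]? = t[i + 0]? := List.getElem?_drop
          rw [hs] at h0; simpa using h0.symm
        have hgb : t[i + 1]? = some b := by
          have h1 : (t.drop i)[1]? = t[i + 1]? := List.getElem?_drop
          rw [hs] at h1; simpa using h1.symm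
        by_cases hab : a = b
        · rw [if_pos ⟨by omega, by rw [hga, hgb, hab]⟩]
          rw [ih (i + 1) t,
              show t.drop (i + 1) = (t.drop i).drop 1 from (List.drop_drop).symm, hs]
          simp [lin, hab]
        · rw [if_neg (by rintro ⟨-, h⟩; rw [hga, hgb] at h; exact hab (by simpa using h))]
          rw [ih (i + 2) t,
              show t.drop (i + 2) = (t.drop i).drop 2 from (List.drop_drop).symm, hs]
          simp [lin, hab]

theorem slice2_eq (u : List Char) (k : Nat) :
    PySem.List.slice u (some (2 * (k : Int))) (some (2 * (k : Int) + 2))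
      = (u.drop (2 * k)).take 2 := by
  rw [show (2 * (k : Int) + 2) = ((2 * k + 2 : Nat) : Int) by push_cast; ring,
      show (2 * (k : Int)) = ((2 * k : Nat) : Int) by push_cast; ring,
      PySem.List.slice_natCast]
  congr 1
  omega

theorem stepP_eq (t : List Char) (j : Nat) :
    gen_digramsStep t ((j : Nat) : Int) = stepP t j := by
  unfold gen_digramsStep stepP
  rw [slice2_eq]
  rw [show (2 * ((j : Nat) : Int) + 1) = ((2 * j + 1 : Nat) : Int) by push_cast; ring]
  have hz : PySem.List.slice t (some 0) (some ((2 * j + 1 : Nat) : Int)) = t.take (2 * j + 1) := by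
    rw [show (0 : Int) = ((0 : Nat) : Int) from rfl, PySem.List.slice_natCast]; simp
  have hl : PySem.List.slice t (some ((2 * j + 1 : Nat) : Int)) (some (t.length : Int))
      = t.drop (2 * j + 1) := by
    rw [PySem.List.slice_natCast]
    exact List.take_of_length_le (by simp)
  rw [hz, hl]
  have hg0 : PySem.List.pyGet? ((t.drop (2 * j)).take 2) 0 = ((t.drop (2 * j)).take 2)[0]? := by
    rw [show (0 : Int) = ((0 : Nat) : Int) from rfl, PySem.List.pyGet?_natCast]
  have hg1 : PySem.List.pyGet? ((t.drop (2 * j)).take 2) 1 = ((t.drop (2 * j)).take 2)[1]? := by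
    rw [show (1 : Int) = ((1 : Nat) : Int) from rfl, PySem.List.pyGet?_natCast]
  simp only [hg0, hg1]
  split_ifs <;> simp

-- Iterations with index ≥ j never touch the first 2*j+1 characters.
theorem foldl_stepP_take (k : Nat) : ∀ (j : Nat) (t : List Char) (m : Nat), m ≤ 2 * j + 1 →
    ((List.range' j k).foldl stepP t).take m = t.take m := by
  induction k with
  | zero => intro j t m _; simp
  | succ k ih =>
    intro j t m hm
    rw [List.range'_succ, List.foldl_cons]
    rw [ih (j + 1) (stepP t j) m (by omega)]
    unfold stepP
    by_cases hc : ((t.drop (2 * j)).take 2).length = 2 ∧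
        ((t.drop (2 * j)).take 2)[0]? = ((t.drop (2 * j)).take 2)[1]?
    · have hlen : 2 * j + 2 ≤ t.length := by
        have := hc.1
        simp [List.length_take, List.length_drop] at this
        omega
      rw [if_pos hc]
      rw [List.take_append_of_le_length (by simp [List.length_take]; omega)]
      rw [List.take_take, Nat.min_eq_left (by omega)]
    · rw [if_neg hc]

-- Main invariant: reading k digrams at positions j ≥ i from the fully-folded text
-- equals B's linear pass on the suffix starting at 2*i.
theorem main_lemma (k : Nat) : ∀ (i : Nat) (t : List Char),
    (List.range' i k).map
      (fun j => (((List.range' i k).foldl stepP t).drop (2 * j)).take 2)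
      = lin k (t.drop (2 * i)) := by
  induction k with
  | zero => intro i t; simp [lin]
  | succ k ih =>
    intro i t
    rw [List.range'_succ, List.foldl_cons, List.map_cons]
    set t1 := stepP t i with ht1
    set t' := (List.range' (i + 1) k).foldl stepP t1 with ht'
    have hfirst : (t'.drop (2 * i)).take 2 = (t1.drop (2 * i)).take 2 := by
      rw [List.take_drop, List.take_drop]
      rw [show ((List.range' (i+1) k).foldl stepP t1).take (2*i+2) = t1.take (2*i+2) from
        foldl_stepP_take k (i+1) t1 (2*i+2) (by omega)]
    have hrest : (List.range' (i + 1) k).map (fun j => (t'.drop (2 * j)).take 2)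
        = lin k (t1.drop (2 * (i + 1))) := ih (i + 1) t1
    rw [hfirst, hrest]
    rcases hs : t.drop (2 * i) with _ | ⟨a, s'⟩
    · -- empty suffix: condition false, nothing changes
      have ht1e : t1 = t := by
        rw [ht1]; unfold stepP; rw [hs]; simp
      have hd2 : t.drop (2 * (i + 1)) = [] := by
        have hlt : t.length ≤ 2 * i := by
          have := congrArg List.length hs; simp at this; omega
        apply List.drop_eq_nil_of_le; omega
      rw [ht1e, hs, hd2]
      simp [lin]
    · rcases hs' : s' with _ | ⟨b, rest⟩
      · -- single char left: len(digram) = 1, condition false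
        have ht1e : t1 = t := by
          rw [ht1]; unfold stepP; rw [hs, hs']; simp
        have hd2 : t.drop (2 * (i + 1)) = [] := by
          have := congrArg List.length hs
          rw [hs'] at this; simp at this
          apply List.drop_eq_nil_of_le; omega
        rw [ht1e, hs, hs', hd2]
        simp [lin]
      · subst hs'
        have hlen : 2 * i + 2 ≤ t.length := by
          have := congrArg List.length hs; simp at this; omega
        have htk : (t.take (2 * i)).length = 2 * i := by
          simp [List.length_take]; omega
        have hd1 : t.drop (2 * i + 1) = b :: rest := by
          rw [← List.drop_drop, hs]; simp
        by_cases hab : a = b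
        · -- duplicate pair: 'x' inserted after position 2*i
          have ht1e : t1 = t.take (2 * i) ++ a :: 'x' :: b :: rest := by
            rw [ht1]; unfold stepP
            rw [hs]
            rw [if_pos ⟨by simp, by simp [hab]⟩]
            rw [List.take_add, hs, hd1]
            simp
          rw [ht1e]
          have hdrop1 : (t.take (2 * i) ++ a :: 'x' :: b :: rest).drop (2 * i)
              = a :: 'x' :: b :: rest := List.drop_left' htk
          have hdrop2 : (t.take (2 * i) ++ a :: 'x' :: b :: rest).drop (2 * (i + 1))
              = b :: rest := by
            rw [show 2 * (i + 1) = (t.take (2*i) ++ [a, 'x']).length by simp [htk]; omega]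
            rw [show t.take (2 * i) ++ a :: 'x' :: b :: rest
                = (t.take (2*i) ++ [a, 'x']) ++ b :: rest by simp]
            exact List.drop_left
          rw [hdrop1, hdrop2]
          simp [lin, hab]
        · -- distinct pair: text unchanged
          have ht1e : t1 = t := by
            rw [ht1]; unfold stepP; rw [hs]
            rw [if_neg]; intro ⟨_, h01⟩
            simp at h01; exact hab h01
          have hd2 : t.drop (2 * (i + 1)) = rest := by
            rw [show 2 * (i + 1) = 2 * i + 2 by ring, ← List.drop_drop, hs]
            simp
          rw [ht1e, hs, hd2]
          simp [lin, hab]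

-- ===== VERDICT (by name: the statement is the Claim_ definition above) =====
theorem gen_digrams_spec : Claim_equal_gen_digrams := by
  intro text _
  show gen_digrams text = gen_digrams_alt text
  unfold gen_digrams gen_digrams_alt gen_digramsN
  rw [go_eq_lin, List.drop_zero]
  generalize text.toList = t
  rw [PySem.List.pyRange_zero, Int.toNat_natCast]
  rw [List.foldl_map, List.map_map]
  have hf : (fun (u : List Char) (k : Nat) => gen_digramsStep u ((k : Nat) : Int)) = stepP :=
    funext fun u => funext fun j => stepP_eq u j
  simp only [Function.comp_def, hf]
  have hsl : ∀ (k : Nat),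
      String.ofList (PySem.List.slice ((List.range ((t.length + 1) / 2)).foldl stepP t)
        (some (2 * (k : Int))) (some (2 * (k : Int) + 2)))
      = String.ofList ((((List.range ((t.length + 1) / 2)).foldl stepP t).drop (2 * k)).take 2) := by
    intro k; rw [slice2_eq]
  simp only [hsl]
  have hmain : (List.range ((t.length + 1) / 2)).map
      (fun j => (((List.range ((t.length + 1) / 2)).foldl stepP t).drop (2 * j)).take 2)
      = lin ((t.length + 1) / 2) t := by
    rw [List.range_eq_range']
    simpa using main_lemma ((t.length + 1) / 2) 0 t
  conv_rhs => rw [← hmain, List.map_map]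
  rfl
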